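-- pv_equiv track=rewrite | github.com/brandoneng000/LeetCode | hard/2071.py | maxTaskAssign
-- ===== SOURCE A (Python) =====
-- from typing import List
-- from bisect import bisect_left
--
-- def maxTaskAssign(tasks: List[int], workers: List[int], pills: int, strength: int) -> int:
--     tasks.sort()
--     workers.sort()
--     left = 0
--     right = min(len(tasks), len(workers))
--
--     while left < right:
--         middle = (left + right + 1) // 2
--         used_pills = 0
--         available_workers = workers[-middle:]
--         can_assign = True
--
--         for task in reversed(tasks[:middle]):
--             if available_workers[-1] >= task:
--                 available_workers.pop()
--             else:
--                 index = bisect_left(available_workers, task - strength)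
--
--                 if index == len(available_workers) or used_pills == pills:
--                     can_assign = False
--                     break
--                 used_pills += 1
--                 available_workers.pop(index)
--
--         if can_assign:
--             left = middle
--         else:
--             right = middle - 1
--
--     return left
-- ===== SOURCE B (Python) =====
-- from typing import List
--
--
-- def maxTaskAssign(tasks: List[int], workers: List[int], pills: int, strength: int) -> int:
--     # Like A, sorts tasks and workers in place (same observable side effect).
--     tasks.sort()
--     workers.sort()
--
--     def can(m):
--         # try the m easiest tasks with the m strongest workers, hardest task
--         # first; a pill step partitions the pool by the threshold and rebuilds
--         # it, instead of A's bisect + in-place pop at the found index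
--         avail = workers[len(workers) - m:]
--         budget = pills
--         for t in reversed(tasks[:m]):
--             if avail and avail[-1] >= t:
--                 avail.pop()
--                 continue
--             weaker = [w for w in avail if w < t - strength]
--             if len(weaker) == len(avail) or budget == 0:
--                 return False
--             avail = weaker + avail[len(weaker) + 1:]
--             budget -= 1
--         return True
--
--     def search(lo, hi):
--         if lo >= hi:
--             return lo
--         mid = (lo + hi + 1) // 2
--         return search(mid, hi) if can(mid) else search(lo, mid - 1)
--
--     return search(0, min(len(tasks), len(workers)))
-- ===== Notes on version B (the rewrite author's own statement) =====
-- stated objective: alternative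
-- what changed: The feasibility check rebuilds the worker pool by partitioning it at the pill threshold (filter + concatenation, early return, a countdown budget) instead of bisect_left plus in-place pop at the found index, and the outer binary search is a recursive function instead of a while loop.
import Mathlib
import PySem

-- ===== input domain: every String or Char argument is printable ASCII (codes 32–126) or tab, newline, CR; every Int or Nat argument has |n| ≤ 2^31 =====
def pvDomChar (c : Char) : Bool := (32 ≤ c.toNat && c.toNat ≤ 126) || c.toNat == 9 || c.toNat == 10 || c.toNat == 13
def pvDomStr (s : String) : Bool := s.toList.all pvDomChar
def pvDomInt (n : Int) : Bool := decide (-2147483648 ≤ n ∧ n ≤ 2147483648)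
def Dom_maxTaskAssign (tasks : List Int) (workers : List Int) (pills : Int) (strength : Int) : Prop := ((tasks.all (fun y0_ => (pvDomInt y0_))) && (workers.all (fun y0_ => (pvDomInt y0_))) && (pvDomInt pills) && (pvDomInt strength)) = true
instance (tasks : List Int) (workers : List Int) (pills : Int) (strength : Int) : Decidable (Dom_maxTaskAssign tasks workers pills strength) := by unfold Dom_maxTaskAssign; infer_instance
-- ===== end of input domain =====

-- B replaces A's bisect+in-place-pop feasibility loop by a pure partition-based
-- rebuild of the worker pool and a recursive binary search (objective: alternative
-- decomposition, same asymptotic cost). Both A and B sort `tasks`/`workers` in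
-- place in Python; the theorems here are about the return value.

-- ===== PORT A =====
-- A's `for task in reversed(tasks[:middle])` loop with `break`, as structural
-- recursion over the reversed task prefix; state = (available_workers, used_pills).
def pvGoA (pills strength : Int) : List Int → List Int → Int → Bool
  | [], _, _ => true
  | t :: rest, avail, used =>
    match PySem.List.pyGet? avail (-1) with
    | none => false      -- unreachable: Python would raise IndexError, but avail is never empty here
    | some w =>
      if w ≥ t then
        pvGoA pills strength rest avail.dropLast used          -- available_workers.pop()
      else
        let index := PySem.List.bisectLeft avail (t - strength)
        if index = avail.length ∨ used = pills then false      -- can_assign = False; break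
        else
          match PySem.List.pop? avail (index : Int) with       -- available_workers.pop(index)
          | none => false                                      -- unreachable: index < len(avail)
          | some r => pvGoA pills strength rest r.2 (used + 1)

-- A's `while left < right` binary search.
def pvLoopA (tasks workers : List Int) (pills strength : Int) (left right : Int) : Int :=
  if left < right then
    -- middle = (left + right + 1) // 2, inlined
    if pvGoA pills strength
        (PySem.List.slice tasks none (some (PySem.Int.floordiv (left + right + 1) 2))).reverse
        (PySem.List.slice workers (some (-(PySem.Int.floordiv (left + right + 1) 2))) none) 0 then
      pvLoopA tasks workers pills strength (PySem.Int.floordiv (left + right + 1) 2) right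
    else
      pvLoopA tasks workers pills strength left (PySem.Int.floordiv (left + right + 1) 2 - 1)
  else left
termination_by (right - left).toNat
decreasing_by
  all_goals
    rw [PySem.Int.floordiv_eq_ediv_of_pos (by omega : (0:Int) < 2)] at *
    omega

def maxTaskAssign (tasks : List Int) (workers : List Int) (pills : Int) (strength : Int) : Int :=
  let ts := PySem.List.sorted tasks (fun x => x)
  let ws := PySem.List.sorted workers (fun x => x)
  pvLoopA ts ws pills strength 0 (min (ts.length : Int) (ws.length : Int))

-- ===== PORT B =====
-- B's `can` loop: pure recursion; the pill step partitions the pool by the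
-- threshold instead of binary-searching it; `budget` counts down.
def pvGoB (strength : Int) : List Int → List Int → Int → Bool
  | [], _, _ => true
  | t :: rest, avail, budget =>
    if avail.getLast?.any (fun w => decide (w ≥ t)) then        -- `avail and avail[-1] >= t`
      pvGoB strength rest avail.dropLast budget                 -- avail.pop()
    else
      let weaker := avail.filter (fun w => decide (w < t - strength))
      if weaker.length = avail.length ∨ budget = 0 then false
      else
        -- `weaker + avail[len(weaker) + 1:]` (the slice index is ≥ 0, so it is `drop`)
        pvGoB strength rest (weaker ++ avail.drop (weaker.length + 1)) (budget - 1)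

def pvCanB (tasks workers : List Int) (pills strength m : Int) : Bool :=
  pvGoB strength (PySem.List.slice tasks none (some m)).reverse
    (PySem.List.slice workers (some ((workers.length : Int) - m)) none) pills

-- B's recursive binary search.
def pvSearchB (tasks workers : List Int) (pills strength : Int) (lo hi : Int) : Int :=
  if lo ≥ hi then lo
  else
    -- mid = (lo + hi + 1) // 2, inlined
    if pvCanB tasks workers pills strength (PySem.Int.floordiv (lo + hi + 1) 2) then
      pvSearchB tasks workers pills strength (PySem.Int.floordiv (lo + hi + 1) 2) hi
    else
      pvSearchB tasks workers pills strength lo (PySem.Int.floordiv (lo + hi + 1) 2 - 1)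
termination_by (hi - lo).toNat
decreasing_by
  all_goals
    rw [PySem.Int.floordiv_eq_ediv_of_pos (by omega : (0:Int) < 2)] at *
    omega

def maxTaskAssign_alt (tasks : List Int) (workers : List Int) (pills : Int) (strength : Int) : Int :=
  let ts := PySem.List.sorted tasks (fun x => x)
  let ws := PySem.List.sorted workers (fun x => x)
  pvSearchB ts ws pills strength 0 (min (ts.length : Int) (ws.length : Int))

-- ===== PRECONDITION & SPEC =====
def Spec_maxTaskAssign (tasks : List Int) (workers : List Int) (pills : Int) (strength : Int) (out : Int) : Prop := out = maxTaskAssign_alt tasks workers pills strength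
instance (tasks : List Int) (workers : List Int) (pills : Int) (strength : Int) (out : Int) : Decidable (Spec_maxTaskAssign tasks workers pills strength out) := by unfold Spec_maxTaskAssign; infer_instance

-- ===== CLAIM (what is proved, stated in full; the proofs are below) =====
def Claim_equal_maxTaskAssign : Prop := ∀ (tasks : List Int) (workers : List Int) (pills : Int) (strength : Int), Dom_maxTaskAssign tasks workers pills strength → Spec_maxTaskAssign tasks workers pills strength (maxTaskAssign tasks workers pills strength)

-- ===== LEMMAS AND PROOFS =====

-- On a sorted pool, the elements below the threshold are exactly the prefix of
-- length `countP`.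
lemma pv_filter_eq_take (x : Int) :
    ∀ (l : List Int), l.Pairwise (· ≤ ·) →
      l.filter (fun w => decide (w < x)) = l.take (l.countP (fun w => decide (w < x))) := by
  intro l hl
  induction l with
  | nil => simp
  | cons a l ih =>
    rcases List.pairwise_cons.mp hl with ⟨ha, hl'⟩
    by_cases h : a < x
    · simp [h, ih hl']
    · have hf : l.filter (fun w => decide (w < x)) = [] := by
        rw [List.filter_eq_nil_iff]
        intro b hb
        have := ha b hb
        simp only [decide_eq_true_eq]
        omega
      have hc0 : l.countP (fun w => decide (w < x)) = 0 := by
        rw [List.countP_eq_length_filter, hf]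
        rfl
      simp [h, hf, hc0]

-- bisect_left on a sorted pool returns the number of elements below the threshold.
lemma pv_bisectLeft_eq_countP (l : List Int) (x : Int) (h : l.Pairwise (· ≤ ·)) :
    PySem.List.bisectLeft l x = l.countP (fun w => decide (w < x)) := by
  obtain ⟨hle, hlt, hge⟩ := PySem.List.bisectLeft_spec l x h
  set i := PySem.List.bisectLeft l x with hi
  have hsplit : l.countP (fun w => decide (w < x))
      = (l.take i).countP (fun w => decide (w < x)) + (l.drop i).countP (fun w => decide (w < x)) := by
    conv_lhs => rw [← List.take_append_drop i l]
    rw [List.countP_append]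
  have htake : (l.take i).countP (fun w => decide (w < x)) = i := by
    have hall : ∀ a ∈ l.take i, decide (a < x) = true := by
      intro a hmem
      obtain ⟨j, hj, hja⟩ := List.mem_iff_getElem.mp hmem
      have hj0 := hj
      simp only [List.length_take] at hj0
      have hj' : j < l.length := by omega
      have hji : j < i := by omega
      have : l[j] < x := hlt j hj' hji
      rw [← hja]
      simp only [List.getElem_take]
      simpa using this
    rw [List.countP_eq_length.mpr hall, List.length_take]
    omega
  have hdrop : (l.drop i).countP (fun w => decide (w < x)) = 0 := by
    apply List.countP_eq_zero.mpr
    intro a hmem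
    obtain ⟨j, hj, hja⟩ := List.mem_iff_getElem.mp hmem
    have hj' : i + j < l.length := by simp [List.length_drop] at hj; omega
    have hx : x ≤ l[i + j] := hge (i + j) hj' (by omega)
    rw [← hja]
    simp only [List.getElem_drop]
    simp only [decide_eq_true_eq]
    omega
  omega

-- The two feasibility loops agree on every (sorted) pool.
lemma pv_go_eq (pills strength : Int) :
    ∀ (ts avail : List Int) (used : Int), avail.Pairwise (· ≤ ·) →
      pvGoA pills strength ts avail used = pvGoB strength ts avail (pills - used) := by
  intro ts
  induction ts with
  | nil => intro avail used _; rfl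
  | cons t rest ih =>
    intro avail used hav
    rcases avail.eq_nil_or_concat with rfl | ⟨l, w, rfl⟩
    · simp [pvGoA, pvGoB, PySem.List.pyGet?_neg_one]
    · simp only [List.concat_eq_append] at hav ⊢
      have hlast : (l ++ [w]).getLast? = some w := List.getLast?_concat
      by_cases hw : w ≥ t
      · -- free branch on both sides
        have hl : l.Pairwise (· ≤ ·) := hav.sublist (List.prefix_append l [w]).sublist
        simp only [pvGoA, pvGoB, PySem.List.pyGet?_neg_one, hlast, Option.any_some,
          decide_eq_true_eq, List.dropLast_concat]
        rw [if_pos hw, if_pos hw]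
        exact ih l used hl
      · -- pill branch on both sides
        have hcnt := pv_bisectLeft_eq_countP (l ++ [w]) (t - strength) hav
        have hflen : ((l ++ [w]).filter (fun v => decide (v < t - strength))).length
            = (l ++ [w]).countP (fun v => decide (v < t - strength)) :=
          List.countP_eq_length_filter.symm
        simp only [pvGoA, pvGoB, PySem.List.pyGet?_neg_one, hlast, Option.any_some,
          decide_eq_true_eq, List.dropLast_concat]
        rw [if_neg hw, if_neg hw, hcnt, hflen]
        set c := (l ++ [w]).countP (fun v => decide (v < t - strength)) with hc
        by_cases hg : c = (l ++ [w]).length ∨ used = pills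
        · have hg' : c = (l ++ [w]).length ∨ pills - used = 0 := by
            rcases hg with h | h
            · exact Or.inl h
            · exact Or.inr (by omega)
          rw [if_pos hg, if_pos hg']
        · push Not at hg
          have hg' : ¬ (c = (l ++ [w]).length ∨ pills - used = 0) := by
            rintro (h | h)
            · exact hg.1 h
            · exact hg.2 (by omega)
          rw [if_neg (by rintro (h | h); exact hg.1 h; exact hg.2 h :
              ¬ (c = (l ++ [w]).length ∨ used = pills)), if_neg hg']
          have hclen : c < (l ++ [w]).length := by
            have := List.countP_le_length (p := fun v => decide (v < t - strength)) (l := l ++ [w])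
            omega
          have herase : (l ++ [w]).eraseIdx c
              = (l ++ [w]).filter (fun v => decide (v < t - strength)) ++ (l ++ [w]).drop (c + 1) := by
            rw [List.eraseIdx_eq_take_drop_succ, pv_filter_eq_take _ _ hav, ← hc]
          rw [show (pills - used - 1) = pills - (used + 1) by omega,
            PySem.List.pop?_natCast (l ++ [w]) c hclen]
          show pvGoA pills strength rest ((l ++ [w]).eraseIdx c) (used + 1) = _
          rw [herase]
          exact ih _ (used + 1) (by rw [← herase]; exact hav.eraseIdx c)
-- The two binary searches agree.
lemma pv_loop_eq (ts ws : List Int) (pills strength : Int) (hws : ws.Pairwise (· ≤ ·)) :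
    ∀ (n : Nat) (l r : Int), n = (r - l).toNat → 0 ≤ l → r ≤ (ws.length : Int) →
      pvLoopA ts ws pills strength l r = pvSearchB ts ws pills strength l r := by
  intro n
  induction n using Nat.strong_induction_on with
  | _ n ih =>
    intro l r hn h0 hr
    rw [pvLoopA, pvSearchB]
    by_cases hlr : l < r
    · rw [if_pos hlr, if_neg (by omega : ¬ l ≥ r)]
      have hmid : PySem.Int.floordiv (l + r + 1) 2 = (l + r + 1) / 2 :=
        PySem.Int.floordiv_eq_ediv_of_pos (by omega)
      set mid := PySem.Int.floordiv (l + r + 1) 2 with hmiddef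
      have h1 : 1 ≤ mid := by omega
      have h2 : mid ≤ r := by omega
      have e1 : PySem.List.slice ws (some (-mid)) none = ws.drop (ws.length - mid.toNat) := by
        rw [show -mid = -((mid.toNat : Nat) : Int) by omega]
        exact PySem.List.slice_from_neg_natCast ws mid.toNat (by omega)
      have e2 : PySem.List.slice ws (some ((ws.length : Int) - mid)) none
          = ws.drop (ws.length - mid.toNat) := by
        rw [show (ws.length : Int) - mid = ((ws.length - mid.toNat : Nat) : Int) by omega]
        exact PySem.List.slice_from_natCast ws (ws.length - mid.toNat)
      have hcan : pvGoA pills strength (PySem.List.slice ts none (some mid)).reverse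
            (PySem.List.slice ws (some (-mid)) none) 0
          = pvCanB ts ws pills strength mid := by
        unfold pvCanB
        rw [e1, e2, pv_go_eq pills strength _ _ 0 (List.Pairwise.drop hws), sub_zero]
      rw [hcan]
      by_cases hc : pvCanB ts ws pills strength mid = true
      · rw [if_pos hc, if_pos hc]
        exact ih (r - mid).toNat (by omega) mid r rfl (by omega) hr
      · rw [if_neg hc, if_neg hc]
        exact ih (mid - 1 - l).toNat (by omega) l (mid - 1) rfl h0 (by omega)
    · rw [if_neg hlr, if_pos (by omega : l ≥ r)]

-- ===== VERDICT (by name: the statement is the Claim_ definition above) =====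
theorem maxTaskAssign_spec : Claim_equal_maxTaskAssign := by
  intro tasks workers pills strength _
  unfold Spec_maxTaskAssign maxTaskAssign maxTaskAssign_alt
  exact pv_loop_eq _ _ _ _ (PySem.List.sorted_pairwise workers (fun x => x))
    _ 0 _ rfl le_rfl (by simp [PySem.List.length_sorted])
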